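-- pv_equiv track=rewrite | github.com/hyuns22/coding-test | 프로그래머스/unrated/135808. 과일 장수/과일 장수.py | solution
-- ===== SOURCE A (Python) =====
-- def solution(k, m, score):
--     answer = 0
--     c = len(score)//m
--     score.sort(reverse=True)
--     sum = 0
--     for i in range(c):
--         li = score[m*i:m*(i+1)]
--         sum += li[-1]*m
--
--     return sum
-- ===== SOURCE B (Python) =====
-- def solution(k, m, score):
--     # Tally-and-walk: count the multiplicity of every score once, then walk the
--     # DISTINCT values from high to low; each value occupies a consecutive run of
--     # ranks in descending order, and it is the minimum of exactly those groups
--     # whose boundary ranks (m, 2m, ..., m*c) fall inside its run.  No per-element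
--     # sort of the whole list, no per-group slicing.
--     c = len(score) // m
--     if c <= 0:
--         return 0
--     limit = m * c
--     cnt = {}
--     for s in score:
--         cnt[s] = cnt.get(s, 0) + 1
--     total = 0
--     rank = 0
--     for v in sorted(cnt, reverse=True):
--         if rank >= limit:
--             break
--         hi = rank + cnt[v]
--         total += v * (min(hi, limit) // m - rank // m)
--         rank = hi
--     return m * total
-- ===== Notes on version B (the rewrite author's own statement) =====
-- stated objective: alternative
-- what changed: B replaces A's whole-list descending sort plus per-group slicing by a tally-and-walk: it counts multiplicities in one pass, sorts only the distinct values, and for each value adds value * (number of group boundaries m,2m,...,m*c falling in that value's rank run), so duplicate-heavy inputs cost O(n + u log u) for u distinct values.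
import Mathlib
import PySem

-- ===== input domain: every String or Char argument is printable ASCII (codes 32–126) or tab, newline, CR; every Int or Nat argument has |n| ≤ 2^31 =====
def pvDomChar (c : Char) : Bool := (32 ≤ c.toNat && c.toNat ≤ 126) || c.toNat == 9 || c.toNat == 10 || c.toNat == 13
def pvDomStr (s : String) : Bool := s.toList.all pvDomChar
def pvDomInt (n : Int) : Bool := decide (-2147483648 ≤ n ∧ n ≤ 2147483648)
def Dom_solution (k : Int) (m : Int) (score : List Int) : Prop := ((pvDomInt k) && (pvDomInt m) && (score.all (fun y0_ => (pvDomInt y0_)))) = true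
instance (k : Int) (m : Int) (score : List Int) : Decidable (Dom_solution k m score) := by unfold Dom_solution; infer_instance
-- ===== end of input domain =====

-- B replaces A's whole-list descending sort + per-group slicing by a tally of
-- multiplicities and a walk over the sorted DISTINCT values, counting the group
-- boundaries inside each value's rank run (objective: alternative algorithm).
-- A sorts `score` in place; the equivalence proved here is about the return value only.

-- ===== PORT A =====
def solution (k : Int) (m : Int) (score : List Int) : Int :=
  let c := PySem.Int.floordiv ((score.length : Int)) m
  let s := PySem.List.sorted score (fun x => x) true
  (PySem.List.pyRange 0 c 1).foldl
    (fun sum i =>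
      sum + PySem.List.pyGetD (PySem.List.slice s (some (m * i)) (some (m * (i + 1)))) (-1) 0 * m)
    0

-- ===== PORT B =====
-- the `for v in sorted(cnt, reverse=True): … break …` loop of Source B
def altLoop (cnt : PySem.Dict Int Int) (m limit : Int) : List Int → Int → Int → Int
  | [], _, total => total
  | v :: rest, rank, total =>
    if limit ≤ rank then total
    else
      altLoop cnt m limit rest (rank + cnt.getD v 0)
        (total + v * (PySem.Int.floordiv (min (rank + cnt.getD v 0) limit) m
                        - PySem.Int.floordiv rank m))

def solution_alt (k : Int) (m : Int) (score : List Int) : Int :=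
  let c := PySem.Int.floordiv ((score.length : Int)) m
  if c ≤ 0 then 0
  else
    let limit := m * c
    let cnt := score.foldl (fun d s => d.insert s (d.getD s 0 + 1)) (PySem.Dict.empty : PySem.Dict Int Int)
    m * altLoop cnt m limit (PySem.List.sorted cnt.keys (fun x => x) true) 0 0

-- ===== PRECONDITION & SPEC =====
-- Pre_ excludes m = 0, on which Python's `len(score)//m` raises ZeroDivisionError (in B too).
def Pre_solution (k : Int) (m : Int) (score : List Int) : Prop := m ≠ 0
instance (k : Int) (m : Int) (score : List Int) : Decidable (Pre_solution k m score) := by unfold Pre_solution; infer_instance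
def pvWitness_solution : Int × Int × List Int := (4, 3, [1, 2, 3, 1, 2, 3, 1])

def Spec_solution (k : Int) (m : Int) (score : List Int) (out : Int) : Prop := out = solution_alt k m score
instance (k : Int) (m : Int) (score : List Int) (out : Int) : Decidable (Spec_solution k m score out) := by unfold Spec_solution; infer_instance

-- ===== CLAIM (what is proved, stated in full; the proofs are below) =====
def Claim_equal_solution : Prop := ∀ (k : Int) (m : Int) (score : List Int), Dom_solution k m score → Pre_solution k m score → Spec_solution k m score (solution k m score)

-- ===== LEMMAS AND PROOFS =====

-- the last element of the i-th descending group is the element at rank m*(i+1)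
lemma slice_last_eq (t : List Int) (m i : Int) (hm : 0 < m) (hi : 0 ≤ i)
    (hub : m * (i + 1) ≤ (t.length : Int)) :
    PySem.List.pyGetD (PySem.List.slice t (some (m * i)) (some (m * (i + 1)))) (-1) 0
      = PySem.List.pyGetD t (m * (i + 1) - 1) 0 := by
  have h0 : 0 ≤ m * i := mul_nonneg hm.le hi
  have h1 : 0 ≤ m * (i + 1) := by nlinarith
  have ha : ((m * i).toNat : Int) = m * i := Int.toNat_of_nonneg h0
  have hb : ((m * (i + 1)).toNat : Int) = m * (i + 1) := Int.toNat_of_nonneg h1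
  have hab : m * i < m * (i + 1) := by nlinarith
  rw [PySem.List.slice_toNat _ h0 h1]
  set a := (m * i).toNat
  set b := (m * (i + 1)).toNat
  have hab' : a < b := by omega
  have hbn : b ≤ t.length := by omega
  have hlen : (List.take (b - a) (List.drop a t)).length = b - a := by simp; omega
  have hne : List.take (b - a) (List.drop a t) ≠ [] :=
    List.ne_nil_of_length_pos (by omega)
  rw [PySem.List.pyGetD_neg_one _ _ hne, List.getLast_eq_getElem,
      PySem.List.pyGetD_eq_getElem _ _ (by omega) (by omega)]
  rw [List.getElem_take, List.getElem_drop]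
  congr 1
  omega

-- the descending sort is the run-length expansion of its distinct values sorted descending
lemma sorted_desc_eq_flatMap (score : List Int) :
    PySem.List.sorted score (fun x => x) true
      = (PySem.List.sorted (PySem.Set.ofList score) (fun x => x) true).flatMap
          (fun v => List.replicate (score.count v) v) := by
  set K := PySem.List.sorted (PySem.Set.ofList score) (fun x => x) true with hK
  have hKperm : K.Perm (PySem.Set.ofList score) :=
    PySem.List.sorted_perm (PySem.Set.ofList score) (fun x : Int => x) true
  have hKnd : K.Nodup := hKperm.nodup_iff.2 ((PySem.Set.nodup_ofList score : (PySem.Set.ofList score).Nodup))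
  have hKp : K.Pairwise (fun a b : Int => b ≤ a) :=
    PySem.List.sorted_pairwise_rev _ _
  have hmemK : ∀ x : Int, x ∈ K ↔ x ∈ score := by
    intro x
    rw [hK, PySem.List.mem_sorted]
    exact PySem.Set.mem_ofList score x
  clear_value K
  apply List.Perm.eq_of_pairwise (le := fun a b : Int => b ≤ a)
  · intro a b _ _ h1 h2; exact le_antisymm h2 h1
  · exact PySem.List.sorted_pairwise_rev _ _
  · -- flatMap of descending blocks of equal elements is descending
    rw [List.flatMap_def, List.pairwise_flatten]
    constructor
    · intro l hl
      simp only [List.mem_map] at hl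
      obtain ⟨v, _, rfl⟩ := hl
      exact List.pairwise_replicate.2 (Or.inr le_rfl)
    · rw [List.pairwise_map]
      refine hKp.imp_of_mem ?_
      intro a b _ _ hba x hx y hy
      rw [List.eq_of_mem_replicate hx, List.eq_of_mem_replicate hy]
      exact hba
  · -- permutation, via counts
    refine (PySem.List.sorted_perm score (fun x => x) true).trans ?_
    rw [List.perm_iff_count]
    intro x
    rw [List.flatMap_def, List.count_flatten, List.map_map]
    have hterm : ∀ v ∈ K, (List.count x ∘ fun v => List.replicate (score.count v) v) v
        = if v = x then score.count x else 0 := by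
      intro v _
      simp only [Function.comp_apply, List.count_replicate, beq_iff_eq]
      split_ifs with h1
      · rw [h1]
      · rfl
    rw [List.map_congr_left hterm]
    by_cases hx : x ∈ score
    · have hxK : x ∈ K := (hmemK x).2 hx
      obtain ⟨l1, l2, rfl⟩ := List.append_of_mem hxK
      have hnotl1 : x ∉ l1 := by
        intro h; exact (List.disjoint_of_nodup_append hKnd) h List.mem_cons_self
      have hnotl2 : x ∉ l2 := (List.nodup_cons.1 (List.Nodup.of_append_right hKnd)).1
      rw [List.map_append, List.sum_append, List.map_cons, List.sum_cons]
      have hz1 : (l1.map fun v => if v = x then score.count x else 0).sum = 0 := by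
        apply List.sum_eq_zero
        intro y hy
        simp only [List.mem_map] at hy
        obtain ⟨v, hv, rfl⟩ := hy
        rw [if_neg]; rintro rfl; exact hnotl1 hv
      have hz2 : (l2.map fun v => if v = x then score.count x else 0).sum = 0 := by
        apply List.sum_eq_zero
        intro y hy
        simp only [List.mem_map] at hy
        obtain ⟨v, hv, rfl⟩ := hy
        rw [if_neg]; rintro rfl; exact hnotl2 hv
      rw [hz1, hz2, if_pos rfl]
      omega
    · rw [List.count_eq_zero_of_not_mem hx, List.sum_eq_zero]
      intro y hy
      simp only [List.mem_map] at hy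
      obtain ⟨v, hv, rfl⟩ := hy
      rw [if_neg]; rintro rfl; exact hx ((hmemK _).1 hv)

lemma floordiv_mono_le {a b m : Int} (hm : 0 < m) (h : a ≤ b) :
    PySem.Int.floordiv a m ≤ PySem.Int.floordiv b m := by
  rw [PySem.Int.le_floordiv_iff_mul_le hm]
  have := PySem.Int.floordiv_mul_add_mod a m
  have := PySem.Int.mod_nonneg a hm
  omega

-- the main loop invariant: walking the remaining run-length blocks from rank r
-- adds exactly the group minima whose boundary exceeds r
lemma altLoop_eq (cnt : PySem.Dict Int Int) (m c : Int) (t : List Int)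
    (hm : 0 < m) (hlim : m * c ≤ (t.length : Int)) :
    ∀ (K : List Int) (r total : Int), 0 ≤ r →
      (∀ v ∈ K, cnt.getD v 0 = (t.count v : Int)) →
      List.drop r.toNat t = K.flatMap (fun v => List.replicate (t.count v) v) →
      altLoop cnt m (m * c) K r total
        = total + ((PySem.List.pyRange (PySem.Int.floordiv r m) c 1).map
            (fun i => PySem.List.pyGetD t (m * (i + 1) - 1) 0)).sum := by
  intro K
  induction K with
  | nil =>
    intro r total hr _ hinv
    have hlen : t.length ≤ r.toNat := by
      by_contra h
      have := List.drop_eq_nil_iff.1 (by simpa using hinv)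
      omega
    have : c ≤ PySem.Int.floordiv r m := by
      rw [PySem.Int.le_floordiv_iff_mul_le hm]
      have : (t.length : Int) ≤ r := by omega
      linarith [mul_comm c m]
    rw [altLoop, PySem.List.pyRange_one_eq_nil this]
    simp
  | cons v rest ih =>
    intro r total hr hcnt hinv
    rw [altLoop]
    by_cases hstop : m * c ≤ r
    · have : c ≤ PySem.Int.floordiv r m := by
        rw [PySem.Int.le_floordiv_iff_mul_le hm]
        linarith [mul_comm c m]
      rw [if_pos hstop, PySem.List.pyRange_one_eq_nil this]
      simp
    · rw [if_neg hstop]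
      push_neg at hstop
      set cv : Int := (t.count v : Int) with hcv
      have hcnt0 : cnt.getD v 0 = cv := hcnt v List.mem_cons_self
      have hcv0 : 0 ≤ cv := by positivity
      set hi := r + cv with hhi
      have hinv' : List.drop hi.toNat t = rest.flatMap (fun v => List.replicate (t.count v) v) := by
        have : hi.toNat = r.toNat + t.count v := by omega
        rw [this, ← List.drop_drop, hinv]
        simp [List.flatMap_cons]
      -- abbreviations for the three range endpoints
      set a := PySem.Int.floordiv r m with hadef
      set b := PySem.Int.floordiv (min hi (m * c)) m with hbdef
      have hfa := PySem.Int.floordiv_mul_add_mod r m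
      have hma := PySem.Int.mod_nonneg r hm
      have hmb := PySem.Int.mod_lt r hm
      have hfb := PySem.Int.floordiv_mul_add_mod (min hi (m * c)) m
      have hmb0 := PySem.Int.mod_nonneg (min hi (m * c)) hm
      have hmb1 := PySem.Int.mod_lt (min hi (m * c)) hm
      have hab : a ≤ b := floordiv_mono_le hm (le_min (by omega) hstop.le)
      have hbc : b ≤ c := by
        nlinarith [min_le_right hi (m * c)]
      -- each group index in [a, b) has its minimum equal to v
      have hval : ∀ i ∈ PySem.List.pyRange a b 1,
          PySem.List.pyGetD t (m * (i + 1) - 1) 0 = v := by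
        intro i hi'
        obtain ⟨hia, hib⟩ := PySem.List.mem_pyRange_one.1 hi'
        have h1 : r < m * (i + 1) := by nlinarith
        have h2 : m * (i + 1) ≤ min hi (m * c) := by nlinarith
        have hj0 : 0 ≤ m * (i + 1) - 1 := by omega
        have hjlen : m * (i + 1) - 1 < (t.length : Int) := by
          have := min_le_right hi (m * c); omega
        rw [PySem.List.pyGetD_eq_getElem _ _ hj0 hjlen]
        have hsmall : (m * (i + 1) - 1).toNat - r.toNat < t.count v := by
          have := min_le_left hi (m * c); omega
        have hlen2 : (m * (i + 1) - 1).toNat - r.toNat < (List.drop r.toNat t).length := by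
          rw [List.length_drop]; omega
        have hdropv : (List.drop r.toNat t)[(m * (i + 1) - 1).toNat - r.toNat]'hlen2 = v := by
          simp only [hinv, List.flatMap_cons]
          rw [List.getElem_append_left (by simpa using hsmall)]
          exact List.getElem_replicate _
        rw [List.getElem_drop] at hdropv
        convert hdropv using 2
        omega
      have hsplit : PySem.List.pyRange a c 1
          = PySem.List.pyRange a b 1 ++ PySem.List.pyRange b c 1 :=
        PySem.List.pyRange_one_append a b c hab hbc
      have hsum1 : ((PySem.List.pyRange a b 1).map
          (fun i => PySem.List.pyGetD t (m * (i + 1) - 1) 0)).sum = v * (b - a) := by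
        rw [List.map_congr_left hval, List.map_const', List.sum_replicate,
            PySem.List.length_pyRange_one, nsmul_eq_mul,
            Int.toNat_of_nonneg (by omega : (0:Int) ≤ b - a), mul_comm]
      have htail : ((PySem.List.pyRange (PySem.Int.floordiv hi m) c 1).map
            (fun i => PySem.List.pyGetD t (m * (i + 1) - 1) 0)).sum
          = ((PySem.List.pyRange b c 1).map
            (fun i => PySem.List.pyGetD t (m * (i + 1) - 1) 0)).sum := by
        rcases le_or_gt hi (m * c) with h | h
        · rw [hbdef, min_eq_left h]
        · have h1 : c ≤ PySem.Int.floordiv hi m := by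
            rw [PySem.Int.le_floordiv_iff_mul_le hm]
            linarith [mul_comm c m]
          have h2 : b = c := by
            have hmin : min hi (m * c) = m * c := min_eq_right h.le
            rw [hmin] at hfb hmb0 hmb1
            have hb' : b = PySem.Int.floordiv (m * c) m := by rw [hbdef, hmin]
            rw [← hb'] at hfb
            by_contra hne
            have hlt : b + 1 ≤ c := by omega
            have hmul : (b + 1) * m ≤ c * m := mul_le_mul_of_nonneg_right hlt hm.le
            have hexp : (b + 1) * m = b * m + m := by ring
            linarith [mul_comm c m]
          rw [PySem.List.pyRange_one_eq_nil h1, h2, PySem.List.pyRange_one_eq_nil le_rfl]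
      rw [hcnt0, ← hhi, ← hbdef,
          ih hi (total + v * (b - a)) (by omega)
            (fun w hw => hcnt w (List.mem_cons_of_mem v hw)) hinv',
          htail, hsplit, List.map_append, List.sum_append, hsum1]
      ring

theorem solution_spec : Claim_equal_solution := by
  intro k m score hdom hpre
  unfold Pre_solution at hpre
  unfold Spec_solution solution solution_alt
  dsimp only
  set N := (score.length : Int) with hN
  set c := PySem.Int.floordiv N m with hc
  set t := PySem.List.sorted score (fun x => x) true with ht
  have htlen : (t.length : Int) = N := by
    rw [ht, hN]
    exact_mod_cast (PySem.List.sorted_perm score (fun x => x) true).length_eq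
  by_cases hcpos : c ≤ 0
  · rw [if_pos hcpos, PySem.List.pyRange_one_eq_nil hcpos]
    simp
  · rw [if_neg hcpos]
    push_neg at hcpos
    -- m must be positive: a nonpositive m with N ≥ 0 gives c ≤ 0
    have hdm := PySem.Int.floordiv_mul_add_mod N m
    rw [← hc] at hdm
    have hN0 : (0:Int) ≤ N := by rw [hN]; exact_mod_cast Int.natCast_nonneg _
    have hmpos : 0 < m := by
      by_contra h
      have hm' : m < 0 := lt_of_le_of_ne (not_lt.1 h) hpre
      have hr := PySem.Int.mod_neg_bounds N hm'
      have h1 : c * m ≤ 1 * m := by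
        apply mul_le_mul_of_nonpos_right _ hm'.le
        omega
      linarith
    have hr0 := PySem.Int.mod_nonneg N hmpos
    have hcmN : m * c ≤ N := by linarith [mul_comm c m]
    -- A's fold is m times the sum of the group minima
    have hA : (PySem.List.pyRange 0 c 1).foldl
        (fun sum i =>
          sum + PySem.List.pyGetD (PySem.List.slice t (some (m * i)) (some (m * (i + 1)))) (-1) 0 * m)
        0
        = m * ((PySem.List.pyRange 0 c 1).map
            (fun i => PySem.List.pyGetD t (m * (i + 1) - 1) 0)).sum := by
      rw [PySem.List.foldl_congr_mem (PySem.List.pyRange 0 c 1)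
          _ (fun sum i => sum + PySem.List.pyGetD t (m * (i + 1) - 1) 0 * m) 0 ?_]
      · rw [PySem.List.foldl_add, List.sum_map_mul_right]
        ring
      · intro acc x hx
        obtain ⟨hx0, hxc⟩ := PySem.List.mem_pyRange_one.1 hx
        rw [slice_last_eq t m x hmpos hx0 (by rw [htlen]; nlinarith)]
    rw [hA]
    congr 1
    -- B's loop computes the same sum
    set cnt := score.foldl (fun d s => d.insert s (d.getD s 0 + 1)) (PySem.Dict.empty : PySem.Dict Int Int) with hcnt
    have hcntD : ∀ v : Int, cnt.getD v 0 = (score.count v : Int) := by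
      intro v
      rw [hcnt, PySem.Dict.foldl_insert_getD_add_one_eq_counter, PySem.Dict.getD_counter]
    have hkeys : cnt.keys = PySem.Set.ofList score := by
      rw [hcnt, PySem.Dict.foldl_insert_getD_add_one_eq_counter, PySem.Dict.keys_counter]
    have hcount : ∀ v : Int, t.count v = score.count v :=
      fun v => (PySem.List.sorted_perm score (fun x => x) true).count_eq v
    have hfun : (fun v => List.replicate (t.count v) v)
        = fun v : Int => List.replicate (score.count v) v :=
      funext fun v => by rw [hcount]
    have hinv0 : List.drop (0:Int).toNat t
        = (PySem.List.sorted cnt.keys (fun x => x) true).flatMap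
            (fun v => List.replicate (t.count v) v) := by
      rw [Int.toNat_zero, List.drop_zero, hkeys, hfun, ht]
      exact sorted_desc_eq_flatMap score
    rw [altLoop_eq cnt m c t hmpos (by omega) _ 0 0 le_rfl
          (fun v _ => by rw [hcntD v, hcount v]) hinv0]
    have h00 : PySem.Int.floordiv 0 m = 0 := by
      rw [PySem.Int.floordiv_eq_ediv_of_pos hmpos]
      norm_num
    rw [h00, zero_add]
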